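-- pv_equiv track=rewrite | github.com/blues-lab/passive-listening-prototype | chrome_transcription_service/src/audio2text.py | compute_merged_phrases_deduped
-- ===== SOURCE A (Python) =====
-- def merge(s1, s2):
--     # Merges s1 with s2 based on end of s1 to start of s2
--     # This function is pretty slow as it's run on a buffer that's not too long
--     # TODO Optimization start from the end and go backwards
--     i = 0
--     found_match = True
--     while not s2.startswith(s1[i:]):
--         i += 1
--         if i == len(s1):
--             found_match = False
--             break
--     return s1[:i] + s2, found_match
--
-- def compute_merged_phrases_deduped(phrases):
--     # phrases: list[str]
--     # Merge phrases that have common ending such as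
--     # "We ate food" + "ate food quickly" -> "We ate food quickly"
--     j = 1
--     merged_phrases = []
--     prev_phrase = phrases[0]
--     while j < len(phrases):
--         curr_phrase = phrases[j]
--         merged_phrase, found_match = merge(prev_phrase, curr_phrase)
--         if not found_match:
--             # End of merge sequence. Set prev_phase to current and repeat
--             merged_phrases.append(prev_phrase)
--             prev_phrase = curr_phrase
--         else:
--             prev_phrase = merged_phrase
--
--         j += 1
--     merged_phrases.append(prev_phrase)
--     return merged_phrases
-- ===== SOURCE B (Python) =====
-- # KMP-based re-implementation: the longest suffix-of-prev = prefix-of-curr overlap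
-- # is computed by a failure-function automaton instead of A's startswith scan.
--
-- def _kmp_step(p, fail, m, c):
--     # advance automaton state m of pattern p by character c
--     while m and (m == len(p) or p[m] != c):
--         m = fail[m - 1]
--     if m < len(p) and p[m] == c:
--         m += 1
--     return m
--
-- def _overlap(s1, s2):
--     # longest k such that s1 ends with s2[:k]
--     fail = []
--     k = 0
--     for j, c in enumerate(s2):
--         if j:
--             k = _kmp_step(s2, fail, k, c)
--         fail.append(k)
--     m = 0
--     for c in s1:
--         m = _kmp_step(s2, fail, m, c)
--     return m
--
-- def compute_merged_phrases_deduped(phrases):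
--     out = []
--     prev = phrases[0]
--     for curr in phrases[1:]:
--         k = _overlap(prev, curr)
--         if k == 0 and prev:
--             out.append(prev)
--             prev = curr
--         else:
--             prev = prev[:len(prev) - k] + curr
--     out.append(prev)
--     return out
-- ===== Notes on version B (the rewrite author's own statement) =====
-- stated objective: alternative
-- what changed: The per-pair overlap (longest suffix of prev that is a prefix of curr) is computed by a KMP failure-function automaton instead of A's scan that retries s2.startswith(s1[i:]) for every i.
import Mathlib
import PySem

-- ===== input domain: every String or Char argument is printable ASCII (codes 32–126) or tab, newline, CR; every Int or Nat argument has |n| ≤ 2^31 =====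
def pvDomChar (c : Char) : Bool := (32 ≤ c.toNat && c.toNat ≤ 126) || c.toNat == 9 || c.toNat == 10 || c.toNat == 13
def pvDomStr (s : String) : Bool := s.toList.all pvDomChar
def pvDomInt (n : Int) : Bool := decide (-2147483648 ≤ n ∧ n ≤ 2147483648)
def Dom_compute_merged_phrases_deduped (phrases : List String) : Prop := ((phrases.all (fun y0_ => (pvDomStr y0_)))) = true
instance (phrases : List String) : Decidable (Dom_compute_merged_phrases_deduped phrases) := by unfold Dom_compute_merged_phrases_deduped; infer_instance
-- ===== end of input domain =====

-- B computes the per-pair overlap with a KMP failure-function automaton instead of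
-- A's restart-the-startswith scan (objective: alternative).

-- ===== PORT A =====

-- the 'while not s2.startswith(s1[i:])' loop of merge; returns (final i, found_match)
def mergeLoopA (s1 s2 : List Char) (i : Nat) : Nat × Bool :=
  if h : PySem.Chars.startswith s2 (s1.drop i) then (i, true)
  else if i + 1 = s1.length then (s1.length, false)
  else mergeLoopA s1 s2 (i + 1)
termination_by s1.length - i
decreasing_by
  have hne : s1.drop i ≠ [] := by
    intro hnil
    simp [PySem.Chars.startswith, hnil] at h
  have : i < s1.length := by
    by_contra hge
    exact hne (List.drop_eq_nil_of_le (by omega))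
  omega

-- merge(s1, s2) of A
def mergeA (s1 s2 : List Char) : List Char × Bool :=
  let r := mergeLoopA s1 s2 0
  (s1.take r.1 ++ s2, r.2)

-- the outer 'while j < len(phrases)' loop of A
def loopA (merged : List String) (prev : String) : List String → List String
  | [] => merged ++ [prev]
  | curr :: rest =>
      let r := mergeA prev.toList curr.toList
      if r.2 then loopA merged (String.ofList r.1) rest
      else loopA (merged ++ [prev]) curr rest

def compute_merged_phrases_deduped (phrases : List String) : List String :=
  match phrases with
  | [] => []          -- Python raises IndexError here; excluded by Pre_
  | p0 :: rest => loopA [] p0 rest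

-- ===== PORT B =====

-- _kmp_step of Source B; the 'while' is run with fuel = initial m (each pass strictly
-- decreases m for the fail tables B builds, so the fuel is never exhausted)
def kmpStepAux (p : List Char) (fail : List Nat) (c : Char) : Nat → Nat → Nat
  | 0, m => m
  | f + 1, m =>
      if m ≠ 0 ∧ (m = p.length ∨ p.getD m ' ' ≠ c)
      then kmpStepAux p fail c f (fail.getD (m - 1) 0)
      else m

def kmpStep (p : List Char) (fail : List Nat) (m : Nat) (c : Char) : Nat :=
  let m' := kmpStepAux p fail c m m
  if m' < p.length ∧ p.getD m' ' ' = c then m' + 1 else m'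

-- the 'for j, c in enumerate(s2)' fail-table loop of _overlap
def buildFail (p : List Char) : List Nat :=
  ((PySem.List.enumerate p 0).foldl
    (fun (st : List Nat × Nat) jc =>
      let k := if jc.1 ≠ 0 then kmpStep p st.1 st.2 jc.2 else st.2
      (st.1 ++ [k], k))
    ([], 0)).1

-- _overlap(s1, s2) of Source B
def overlapB (s1 s2 : List Char) : Nat :=
  let fl := buildFail s2
  s1.foldl (fun m c => kmpStep s2 fl m c) 0

def compute_merged_phrases_deduped_alt (phrases : List String) : List String :=
  match phrases with
  | [] => []          -- Python raises IndexError here; excluded by Pre_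
  | p0 :: rest =>
      let r := rest.foldl
        (fun (st : List String × String) curr =>
          let k := overlapB st.2.toList curr.toList
          if k = 0 ∧ st.2 ≠ "" then (st.1 ++ [st.2], curr)
          else (st.1, String.ofList (st.2.toList.take (st.2.toList.length - k) ++ curr.toList)))
        ([], p0)
      r.1 ++ [r.2]

-- ===== PRECONDITION & SPEC =====
-- Both Pythons evaluate phrases[0], so the empty list raises IndexError: excluded.
def Pre_compute_merged_phrases_deduped (phrases : List String) : Prop := phrases ≠ []
instance (phrases : List String) : Decidable (Pre_compute_merged_phrases_deduped phrases) := by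
  unfold Pre_compute_merged_phrases_deduped; infer_instance

def pvWitness_compute_merged_phrases_deduped : List String := ["we ate food", "ate food quickly", "zebra"]

def Spec_compute_merged_phrases_deduped (phrases : List String) (out : List String) : Prop := out = compute_merged_phrases_deduped_alt phrases
instance (phrases : List String) (out : List String) : Decidable (Spec_compute_merged_phrases_deduped phrases out) := by unfold Spec_compute_merged_phrases_deduped; infer_instance

-- ===== CLAIM (what is proved, stated in full; the proofs are below) =====
def Claim_equal_compute_merged_phrases_deduped : Prop := ∀ (phrases : List String), Dom_compute_merged_phrases_deduped phrases → Pre_compute_merged_phrases_deduped phrases → Spec_compute_merged_phrases_deduped phrases (compute_merged_phrases_deduped phrases)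

-- ===== LEMMAS AND PROOFS =====

-- Ov p s = the largest k (≤ min |s| |p|) such that p.take k is a suffix of s:
-- the length of the longest suffix of s that is a prefix of p.
def Ov (p s : List Char) : Nat :=
  Nat.findGreatest (fun k => p.take k <:+ s) (min s.length p.length)

lemma ov_suffix (p s : List Char) : p.take (Ov p s) <:+ s := by
  unfold Ov
  exact Nat.findGreatest_spec (P := fun k => p.take k <:+ s)
    (n := min s.length p.length) (Nat.zero_le _) (by simp)

lemma ov_le_s (p s : List Char) : Ov p s ≤ s.length :=
  le_trans (Nat.findGreatest_le _) (Nat.min_le_left _ _)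

lemma ov_le_p (p s : List Char) : Ov p s ≤ p.length :=
  le_trans (Nat.findGreatest_le _) (Nat.min_le_right _ _)

lemma ov_ge (p s : List Char) {k : Nat} (hk : k ≤ p.length) (h : p.take k <:+ s) :
    k ≤ Ov p s := by
  have hlen : k ≤ s.length := by
    have := h.length_le
    simpa [Nat.min_eq_left hk] using this
  exact Nat.le_findGreatest (by omega) h

lemma ov_nil (p : List Char) : Ov p [] = 0 := by
  have := ov_le_s p []
  simpa using this

-- appending one character: nonzero overlaps of s ++ [c]
lemma suffix_append_singleton {l s : List Char} {x c : Char} :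
    l ++ [x] <:+ s ++ [c] ↔ l <:+ s ∧ x = c := by
  constructor
  · intro h
    have h' : (x :: l.reverse) <+: (c :: s.reverse) := by
      have := List.reverse_prefix.2 h
      simpa using this
    rcases (List.cons_prefix_cons).1 h' with ⟨hx, hl⟩
    exact ⟨List.reverse_prefix.1 hl, hx⟩
  · rintro ⟨⟨t, rfl⟩, rfl⟩
    exact ⟨t, by simp⟩

lemma overlap_snoc {p s : List Char} {c : Char} {k : Nat} (hk : k < p.length) :
    (p.take (k + 1) <:+ s ++ [c]) ↔ (p.take k <:+ s ∧ p.getD k ' ' = c) := by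
  rw [List.take_add_one]
  have : p[k]?.toList = [p.getD k ' '] := by
    simp [List.getElem?_eq_getElem hk]
  rw [this, suffix_append_singleton]

-- a suffix strictly shorter than x :: t is a suffix of t
lemma suffix_of_suffix_cons {l t : List Char} {x : Char} (h : l <:+ x :: t)
    (hlen : l.length ≤ t.length) : l <:+ t := by
  rcases h with ⟨u, hu⟩
  cases u with
  | nil => simp at hu; subst hu; simp at hlen
  | cons y u' =>
      injection hu with h1 h2
      exact ⟨u', h2⟩

lemma suffix_of_suffix_length_le {l₁ l₂ l₃ : List Char} (h1 : l₁ <:+ l₃) (h2 : l₂ <:+ l₃)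
    (hl : l₁.length ≤ l₂.length) : l₁ <:+ l₂ := by
  rw [← List.reverse_prefix] at h1 h2 ⊢
  exact List.prefix_of_prefix_length_le h1 h2 (by simpa using hl)

-- transfer: below m = Ov p s, overlaps of s are exactly the borders of p.take m,
-- i.e. the overlaps of (p.drop 1).take (m - 1)
lemma overlap_transfer {p s : List Char} {m k : Nat} (hm : m = Ov p s) (hmpos : m ≠ 0)
    (hk : k ≤ m - 1) :
    (p.take k <:+ s) ↔ (p.take k <:+ (p.drop 1).take (m - 1)) := by
  have hmp : m ≤ p.length := hm ▸ ov_le_p p s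
  have hms : m ≤ s.length := hm ▸ ov_le_s p s
  have hsuf : p.take m <:+ s := hm ▸ ov_suffix p s
  have hdt : (p.take m).drop 1 = (p.drop 1).take (m - 1) := by
    rw [List.drop_take]
  have hlenk : (p.take k).length = k := by
    simp [Nat.min_eq_left (by omega : k ≤ p.length)]
  have hlenm : (p.take m).length = m := by simp [Nat.min_eq_left hmp]
  constructor
  · intro h
    have h1 : p.take k <:+ p.take m :=
      suffix_of_suffix_length_le h hsuf (by omega)
    cases htm : p.take m with
    | nil => rw [htm] at hlenm; simp at hlenm; omega
    | cons x t =>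
        rw [htm] at h1 hdt
        have ht : t.length = m - 1 := by
          rw [htm] at hlenm; simp at hlenm; omega
        have h2 := suffix_of_suffix_cons h1 (by omega)
        rw [← hdt]
        simpa using h2
  · intro h
    rw [← hdt] at h
    exact h.trans ((List.drop_suffix 1 _).trans hsuf)

-- the fail-table spec: entry j is the longest proper border of p.take (j+1)
def failVal (p : List Char) (j : Nat) : Nat := Ov p ((p.drop 1).take j)

lemma failVal_le (p : List Char) (j : Nat) : failVal p j ≤ j := by
  have h := ov_le_s p ((p.drop 1).take j)
  have : ((p.drop 1).take j).length ≤ j := by simp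
  unfold failVal
  omega

-- the while-loop of _kmp_step: its result r is the largest k ≤ m that is an overlap
-- of (p, s) and at which the automaton can extend by c (or 0)
lemma kmpStepAux_spec (p : List Char) (c : Char) (fl : List Nat) :
    ∀ (m : Nat) (s : List Char) (fuel : Nat), m = Ov p s →
      (∀ j, j < m → fl.getD j 0 = failVal p j) → m ≤ fuel →
      kmpStepAux p fl c fuel m ≤ m ∧
      p.take (kmpStepAux p fl c fuel m) <:+ s ∧
      (kmpStepAux p fl c fuel m = 0 ∨
        (kmpStepAux p fl c fuel m < p.length ∧ p.getD (kmpStepAux p fl c fuel m) ' ' = c)) ∧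
      (∀ k, k ≤ m → p.take k <:+ s → k < p.length → p.getD k ' ' = c →
        k ≤ kmpStepAux p fl c fuel m) := by
  intro m
  induction m using Nat.strong_induction_on with
  | _ m ih =>
    intro s fuel hm hf hfuel
    match fuel with
    | 0 =>
        have hm0 : m = 0 := by omega
        subst hm0
        refine ⟨le_refl _, by simp [kmpStepAux], Or.inl rfl, ?_⟩
        intro k hk _ _ _; omega
    | f + 1 =>
        by_cases hcond : m ≠ 0 ∧ (m = p.length ∨ p.getD m ' ' ≠ c)
        · -- continue: one pass of the while body
          have hstep : kmpStepAux p fl c (f + 1) m = kmpStepAux p fl c f (fl.getD (m - 1) 0) := by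
            rw [kmpStepAux, if_pos hcond]
          obtain ⟨hm0, hor⟩ := hcond
          have hfm : fl.getD (m - 1) 0 = failVal p (m - 1) := hf _ (by omega)
          set m₁ := fl.getD (m - 1) 0 with hm₁def
          have hm₁ : m₁ = Ov p ((p.drop 1).take (m - 1)) := by rw [hfm]; rfl
          have hm₁le : m₁ ≤ m - 1 := by rw [hfm]; exact failVal_le p (m - 1)
          have hf' : ∀ j, j < m₁ → fl.getD j 0 = failVal p j := by
            intro j hj; exact hf j (by omega)
          have hIH := ih m₁ (by omega) ((p.drop 1).take (m - 1)) f hm₁ hf' (by omega)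
          obtain ⟨hr1, hr2, hr3, hr4⟩ := hIH
          set r := kmpStepAux p fl c f m₁ with hrdef
          rw [hstep]
          have hrm1 : r ≤ m - 1 := le_trans hr1 hm₁le
          refine ⟨by omega, ?_, hr3, ?_⟩
          · exact (overlap_transfer hm hm0 hrm1).mpr hr2
          · intro k hk hks hkl hkc
            have hkm : k ≠ m := by
              intro h; subst h
              rcases hor with h | h
              · omega
              · exact h hkc
            have hk1 : k ≤ m - 1 := by omega
            have hks' : p.take k <:+ (p.drop 1).take (m - 1) :=
              (overlap_transfer hm hm0 hk1).mp hks
            have hkm₁ : k ≤ m₁ := by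
              rw [hm₁]
              exact ov_ge p _ (by omega) hks'
            exact hr4 k hkm₁ hks' hkl hkc
        · -- stop
          have hstep : kmpStepAux p fl c (f + 1) m = m := by
            rw [kmpStepAux, if_neg hcond]
          rw [hstep]
          refine ⟨le_refl _, hm ▸ ov_suffix p s, ?_, ?_⟩
          · by_cases hmz : m = 0
            · exact Or.inl hmz
            · have h2 : ¬(m = p.length ∨ p.getD m ' ' ≠ c) := fun h => hcond ⟨hmz, h⟩
              obtain ⟨hne, heq⟩ := not_or.mp h2
              have hlep : m ≤ p.length := hm ▸ ov_le_p p s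
              exact Or.inr ⟨by omega, not_not.mp heq⟩
          · intro k hk _ _ _; exact hk

-- one character step of the automaton
lemma kmpStep_spec {p s : List Char} {fl : List Nat} {c : Char} {m : Nat}
    (hm : m = Ov p s) (hf : ∀ j, j < m → fl.getD j 0 = failVal p j) :
    kmpStep p fl m c = Ov p (s ++ [c]) := by
  obtain ⟨hr1, hr2, hr3, hr4⟩ := kmpStepAux_spec p c fl m s m hm hf (le_refl m)
  rw [kmpStep]
  set r := kmpStepAux p fl c m m with hrdef
  by_cases hc : r < p.length ∧ p.getD r ' ' = c
  · rw [if_pos hc]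
    have hge : r + 1 ≤ Ov p (s ++ [c]) :=
      ov_ge p (s ++ [c]) (by omega) ((overlap_snoc hc.1).mpr ⟨hr2, hc.2⟩)
    have hle : Ov p (s ++ [c]) ≤ r + 1 := by
      cases hK : Ov p (s ++ [c]) with
      | zero => omega
      | succ k =>
          have hsufK : p.take (k + 1) <:+ s ++ [c] := hK ▸ ov_suffix p (s ++ [c])
          have hKp : k + 1 ≤ p.length := hK ▸ ov_le_p p (s ++ [c])
          obtain ⟨hks, hkc⟩ := (overlap_snoc (by omega)).mp hsufK
          have hkm : k ≤ m := by rw [hm]; exact ov_ge p s (by omega) hks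
          have := hr4 k hkm hks (by omega) hkc
          omega
    omega
  · rw [if_neg hc]
    have hr0 : r = 0 := by
      rcases hr3 with h | h
      · exact h
      · exact absurd h hc
    rw [hr0]
    cases hK : Ov p (s ++ [c]) with
    | zero => rfl
    | succ k =>
        have hsufK : p.take (k + 1) <:+ s ++ [c] := hK ▸ ov_suffix p (s ++ [c])
        have hKp : k + 1 ≤ p.length := hK ▸ ov_le_p p (s ++ [c])
        obtain ⟨hks, hkc⟩ := (overlap_snoc (by omega)).mp hsufK
        have hkm : k ≤ m := by rw [hm]; exact ov_ge p s (by omega) hks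
        have hk0 : k = 0 := by have := hr4 k hkm hks (by omega) hkc; omega
        subst hk0
        rw [hr0] at hc
        exact absurd ⟨by omega, hkc⟩ hc

-- the fail-building fold: invariant after the first n characters of p
lemma buildFail_aux (p : List Char) : ∀ n, n ≤ p.length →
    (((PySem.List.enumerate (p.take n) 0).foldl
      (fun (st : List Nat × Nat) jc =>
        let k := if jc.1 ≠ 0 then kmpStep p st.1 st.2 jc.2 else st.2
        (st.1 ++ [k], k)) ([], 0)).1.length = n ∧
     (∀ j, j < n → ((PySem.List.enumerate (p.take n) 0).foldl
      (fun (st : List Nat × Nat) jc =>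
        let k := if jc.1 ≠ 0 then kmpStep p st.1 st.2 jc.2 else st.2
        (st.1 ++ [k], k)) ([], 0)).1.getD j 0 = failVal p j) ∧
     ((PySem.List.enumerate (p.take n) 0).foldl
      (fun (st : List Nat × Nat) jc =>
        let k := if jc.1 ≠ 0 then kmpStep p st.1 st.2 jc.2 else st.2
        (st.1 ++ [k], k)) ([], 0)).2 = failVal p (n - 1)) := by
  intro n
  induction n with
  | zero =>
      intro _
      refine ⟨by simp, ?_, ?_⟩
      · intro j hj; omega
      · simp [failVal, ov_nil]
  | succ n ihn =>
      intro hn1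
      have hn : n < p.length := by omega
      obtain ⟨ih1, ih2, ih3⟩ := ihn (by omega)
      have hsplit : p.take (n + 1) = p.take n ++ [p[n]] := by
        rw [List.take_add_one, List.getElem?_eq_getElem hn]; rfl
      have henum : PySem.List.enumerate (p.take (n + 1)) 0
          = PySem.List.enumerate (p.take n) 0 ++ [((n : Int), p[n])] := by
        rw [hsplit, PySem.List.enumerate_append, PySem.List.enumerate_cons]
        simp [Nat.min_eq_left (le_of_lt hn)]
      rw [henum, List.foldl_append]
      set st := (PySem.List.enumerate (p.take n) 0).foldl
        (fun (st : List Nat × Nat) jc =>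
          let k := if jc.1 ≠ 0 then kmpStep p st.1 st.2 jc.2 else st.2
          (st.1 ++ [k], k)) ([], 0) with hstdef
      have happ : (([((n : Int), p[n])]).foldl
          (fun (st : List Nat × Nat) jc =>
            let k := if jc.1 ≠ 0 then kmpStep p st.1 st.2 jc.2 else st.2
            (st.1 ++ [k], k)) st)
          = (st.1 ++ [if ((n : Int)) ≠ 0 then kmpStep p st.1 st.2 p[n] else st.2],
             if ((n : Int)) ≠ 0 then kmpStep p st.1 st.2 p[n] else st.2) := rfl
      rw [happ]
      -- the new automaton value
      have hknew : (if ((n : Int)) ≠ 0 then kmpStep p st.1 st.2 p[n] else st.2) = failVal p n := by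
        by_cases hn0 : n = 0
        · subst hn0
          rw [if_neg (by simp)]
          simpa using ih3
        · rw [if_pos (by exact_mod_cast hn0)]
          have hst2 : st.2 = Ov p ((p.drop 1).take (n - 1)) := ih3
          have hst2le : st.2 ≤ n - 1 := by rw [ih3]; exact failVal_le p (n - 1)
          have hf : ∀ j, j < st.2 → st.1.getD j 0 = failVal p j := by
            intro j hj; exact ih2 j (by omega)
          have hstep := kmpStep_spec (c := p[n]) hst2 hf
          rw [hstep]
          have hlt : n - 1 < (p.drop 1).length := by simp; omega
          have hget : (p.drop 1)[n - 1] = p[n] := by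
            rw [List.getElem_drop]
            congr 1
            omega
          have h1 : (p.drop 1).take ((n - 1) + 1)
              = (p.drop 1).take (n - 1) ++ [(p.drop 1)[n - 1]] := by
            rw [List.take_add_one, List.getElem?_eq_getElem hlt]; rfl
          have h2 : (n - 1) + 1 = n := by omega
          rw [h2, hget] at h1
          rw [failVal, ← h1]
      refine ⟨by simp [ih1], ?_, by simpa using hknew⟩
      intro j hj
      by_cases hjn : j < n
      · rw [List.getD_eq_getElem?_getD, List.getElem?_append_left (by omega),
          ← List.getD_eq_getElem?_getD]
        exact ih2 j hjn
      · have hjeq : j = n := by omega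
        subst hjeq
        rw [List.getD_eq_getElem?_getD, List.getElem?_append_right (by omega), ih1]
        simpa using hknew

lemma buildFail_spec (p : List Char) :
    ∀ j, j < p.length → (buildFail p).getD j 0 = failVal p j := by
  have h := buildFail_aux p p.length (le_refl _)
  rw [List.take_length] at h
  exact h.2.1

lemma overlapB_eq (s1 s2 : List Char) : overlapB s1 s2 = Ov s2 s1 := by
  unfold overlapB
  induction s1 using List.reverseRecOn with
  | nil => simp [ov_nil]
  | append_singleton s1 c ih =>
      rw [List.foldl_append]
      simp only [List.foldl]
      rw [ih]
      exact kmpStep_spec rfl (fun j hj => buildFail_spec s2 j (by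
        have := ov_le_p s2 s1; omega))

-- the startswith test of A, as an overlap statement
lemma startswith_iff_overlap {s1 s2 : List Char} {i : Nat} (hi : i ≤ s1.length) :
    (PySem.Chars.startswith s2 (s1.drop i) = true) ↔
      (s1.length - i ≤ s2.length ∧ s2.take (s1.length - i) <:+ s1) := by
  rw [PySem.Chars.startswith, List.isPrefixOf_iff_prefix]
  constructor
  · intro h
    have hlen : s1.length - i ≤ s2.length := by
      have := h.length_le; simp at this; omega
    refine ⟨hlen, ?_⟩
    have hq : s1.drop i = s2.take (s1.length - i) := by
      have := List.prefix_iff_eq_take.1 h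
      simpa using this
    rw [← hq]
    exact List.drop_suffix i s1
  · rintro ⟨hlen, hsuf⟩
    have hlent : (s2.take (s1.length - i)).length = s1.length - i := by
      simp [Nat.min_eq_left hlen]
    have hq := List.suffix_iff_eq_drop.1 hsuf
    rw [hlent] at hq
    have hdr : s1.length - (s1.length - i) = i := by omega
    rw [hdr] at hq
    rw [← hq]
    exact List.take_prefix _ _

lemma mergeLoopA_found (s1 s2 : List Char) (hK : 0 < Ov s2 s1) :
    ∀ d i, i + d = s1.length - Ov s2 s1 → mergeLoopA s1 s2 i = (s1.length - Ov s2 s1, true) := by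
  have hKs := ov_le_s s2 s1
  have hKp := ov_le_p s2 s1
  intro d
  induction d with
  | zero =>
      intro i hi
      have hi' : i = s1.length - Ov s2 s1 := by omega
      have hni : s1.length - i = Ov s2 s1 := by omega
      have hsw : PySem.Chars.startswith s2 (s1.drop i) = true := by
        rw [startswith_iff_overlap (by omega)]
        rw [hni]
        exact ⟨hKp, ov_suffix s2 s1⟩
      rw [mergeLoopA, dif_pos hsw, hi']
  | succ d ihd =>
      intro i hi
      have hilt : i < s1.length - Ov s2 s1 := by omega
      have hsw : ¬ (PySem.Chars.startswith s2 (s1.drop i) = true) := by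
        rw [startswith_iff_overlap (by omega)]
        rintro ⟨hlen, hsuf⟩
        have := ov_ge s2 s1 hlen hsuf
        omega
      rw [mergeLoopA, dif_neg hsw, if_neg (by omega)]
      exact ihd (i + 1) (by omega)

lemma mergeLoopA_notfound (s1 s2 : List Char) (hK : Ov s2 s1 = 0) :
    ∀ d i, i + d + 1 = s1.length → mergeLoopA s1 s2 i = (s1.length, false) := by
  intro d
  induction d with
  | zero =>
      intro i hi
      have hsw : ¬ (PySem.Chars.startswith s2 (s1.drop i) = true) := by
        rw [startswith_iff_overlap (by omega)]
        rintro ⟨hlen, hsuf⟩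
        have := ov_ge s2 s1 hlen hsuf
        omega
      rw [mergeLoopA, dif_neg hsw, if_pos (by omega)]
  | succ d ihd =>
      intro i hi
      have hsw : ¬ (PySem.Chars.startswith s2 (s1.drop i) = true) := by
        rw [startswith_iff_overlap (by omega)]
        rintro ⟨hlen, hsuf⟩
        have := ov_ge s2 s1 hlen hsuf
        omega
      rw [mergeLoopA, dif_neg hsw, if_neg (by omega)]
      exact ihd (i + 1) (by omega)

-- A's merge loop, characterised by the maximal overlap
lemma mergeLoopA_eq (s1 s2 : List Char) :
    mergeLoopA s1 s2 0 =
      if Ov s2 s1 = 0 ∧ s1 ≠ [] then (s1.length, false)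
      else (s1.length - Ov s2 s1, true) := by
  by_cases hnil : s1 = []
  · subst hnil
    rw [mergeLoopA, dif_pos (by simp [PySem.Chars.startswith])]
    simp [ov_nil]
  · by_cases hK : Ov s2 s1 = 0
    · rw [if_pos ⟨hK, hnil⟩]
      have hlen : 0 < s1.length := List.length_pos_of_ne_nil hnil
      exact mergeLoopA_notfound s1 s2 hK (s1.length - 1) 0 (by omega)
    · rw [if_neg (by tauto)]
      exact mergeLoopA_found s1 s2 (Nat.pos_of_ne_zero hK) (s1.length - Ov s2 s1) 0 (by omega)

lemma toList_ne_nil_iff (s : String) : s.toList ≠ [] ↔ s ≠ "" := by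
  constructor
  · intro h hs; subst hs; simp at h
  · intro h hl
    apply h
    have hs : s = String.ofList s.toList := by simp
    rw [hs, hl]

-- both outer loops agree, step by step
lemma outer_eq : ∀ (rest : List String) (merged : List String) (prev : String),
    loopA merged prev rest =
      ((rest.foldl
        (fun (st : List String × String) curr =>
          let k := overlapB st.2.toList curr.toList
          if k = 0 ∧ st.2 ≠ "" then (st.1 ++ [st.2], curr)
          else (st.1, String.ofList (st.2.toList.take (st.2.toList.length - k) ++ curr.toList)))
        (merged, prev)).1
      ++ [(rest.foldl
        (fun (st : List String × String) curr =>
          let k := overlapB st.2.toList curr.toList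
          if k = 0 ∧ st.2 ≠ "" then (st.1 ++ [st.2], curr)
          else (st.1, String.ofList (st.2.toList.take (st.2.toList.length - k) ++ curr.toList)))
        (merged, prev)).2]) := by
  intro rest
  induction rest with
  | nil => intro merged prev; rfl
  | cons curr rest ih =>
      intro merged prev
      rw [List.foldl_cons]
      simp only []
      rw [overlapB_eq]
      set K := Ov curr.toList prev.toList with hKdef
      rw [loopA]
      simp only [mergeA, mergeLoopA_eq]
      by_cases hc : K = 0 ∧ prev ≠ ""
      · have hc' : K = 0 ∧ prev.toList ≠ [] := ⟨hc.1, (toList_ne_nil_iff prev).mpr hc.2⟩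
        rw [if_pos hc']
        rw [if_pos hc]
        simpa using ih (merged ++ [prev]) curr
      · have hc' : ¬ (K = 0 ∧ prev.toList ≠ []) := by
          intro h; exact hc ⟨h.1, (toList_ne_nil_iff prev).mp h.2⟩
        rw [if_neg hc']
        rw [if_neg hc]
        simpa using ih merged (String.ofList (prev.toList.take (prev.toList.length - K) ++ curr.toList))

-- ===== VERDICT (by name: the statement is the Claim_ definition above) =====
theorem compute_merged_phrases_deduped_spec : Claim_equal_compute_merged_phrases_deduped := by
  intro phrases _ hpre
  unfold Spec_compute_merged_phrases_deduped
  match phrases with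
  | [] => exact absurd rfl hpre
  | p0 :: rest =>
      unfold compute_merged_phrases_deduped compute_merged_phrases_deduped_alt
      exact outer_eq rest [] p0
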